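-- pv_equiv track=rewrite | github.com/siinghd/progettotweb | python/run0.py | returnColumnCord
-- ===== SOURCE A (Python) =====
-- def returnColumnCord(arr):
--     values= '\n'
--     i = 0
--     for x in arr:
--         i+=1
--         values+=f'{x[0]}|'
--         if(i==4):
--             i=0
--             values+='\n'
--     return values
-- ===== SOURCE B (Python) =====
-- def returnColumnCord(arr):
--     parts = ['\n']
--     for j in range(0, len(arr), 4):
--         chunk = arr[j:j+4]
--         parts.append(''.join(f'{x[0]}|' for x in chunk))
--         if len(chunk) == 4:
--             parts.append('\n')
--     return ''.join(parts)
-- ===== Notes on version B (the rewrite author's own statement) =====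
-- stated objective: alternative
-- what changed: Replaced A's flat loop with a modulo-4 counter and repeated string concatenation by a chunk-of-four traversal that joins each slice and appends '\n' only after full chunks, collecting pieces in a list joined once.
import Mathlib
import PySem

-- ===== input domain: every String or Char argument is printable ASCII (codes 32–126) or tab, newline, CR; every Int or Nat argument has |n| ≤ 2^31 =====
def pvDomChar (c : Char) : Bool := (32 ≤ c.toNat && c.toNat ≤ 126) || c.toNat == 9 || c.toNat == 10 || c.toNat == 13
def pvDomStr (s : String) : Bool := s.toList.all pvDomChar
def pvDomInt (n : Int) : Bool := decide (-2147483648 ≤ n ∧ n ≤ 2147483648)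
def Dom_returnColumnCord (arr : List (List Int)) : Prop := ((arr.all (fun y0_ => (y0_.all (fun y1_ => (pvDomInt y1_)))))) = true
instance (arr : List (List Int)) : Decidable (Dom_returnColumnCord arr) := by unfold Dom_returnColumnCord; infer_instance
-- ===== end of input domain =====

-- B traverses the input in chunks of four and joins pieces once, instead of A's flat
-- loop with a modulo-4 counter and repeated string concatenation (objective: alternative).

-- ===== PORT A =====
-- f'{x[0]}|' : x[0] raises IndexError on an empty row; Pre_ excludes that, getD 0 is unreachable inside Pre_.
def pvCell (x : List Int) : String := PySem.Int.toStr ((PySem.List.pyGet? x 0).getD 0)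

-- the loop body of A, as a helper (state = (values, i))
def pvStep (st : String × Int) (x : List Int) : String × Int :=
  let i := st.2 + 1
  let values := st.1 ++ pvCell x ++ "|"
  if i == 4 then (values ++ "\n", 0) else (values, i)

def returnColumnCord (arr : List (List Int)) : String :=
  (arr.foldl pvStep ("\n", 0)).1

-- ===== PORT B =====
def pvPiece (x : List Int) : String := PySem.Int.toStr ((PySem.List.pyGet? x 0).getD 0) ++ "|"

-- chunk-of-four traversal: each full chunk is joined and followed by '\n'; the final
-- partial chunk (the catch-all, fewer than four rows) is joined without a newline.
def pvChunks : List (List Int) → String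
  | a :: b :: c :: d :: rest =>
      (pvPiece a ++ pvPiece b ++ pvPiece c ++ pvPiece d) ++ "\n" ++ pvChunks rest
  | l => String.join (l.map pvPiece)

def returnColumnCord_alt (arr : List (List Int)) : String := "\n" ++ pvChunks arr

-- ===== PRECONDITION & SPEC =====
-- A raises IndexError (x[0]) when some row is empty; exactly those inputs are excluded.
def Pre_returnColumnCord (arr : List (List Int)) : Prop := ∀ x ∈ arr, x ≠ []

instance (arr : List (List Int)) : Decidable (Pre_returnColumnCord arr) := by
  unfold Pre_returnColumnCord; infer_instance

def pvWitness_returnColumnCord : List (List Int) := [[1, 2], [3], [4], [5], [6]]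

def Spec_returnColumnCord (arr : List (List Int)) (out : String) : Prop := out = returnColumnCord_alt arr
instance (arr : List (List Int)) (out : String) : Decidable (Spec_returnColumnCord arr out) := by unfold Spec_returnColumnCord; infer_instance

-- ===== CLAIM (what is proved, stated in full; the proofs are below) =====
def Claim_equal_returnColumnCord : Prop := ∀ (arr : List (List Int)), Dom_returnColumnCord arr → Pre_returnColumnCord arr → Spec_returnColumnCord arr (returnColumnCord arr)

-- ===== LEMMAS AND PROOFS =====

theorem pvFoldl_chunks (arr : List (List Int)) : ∀ (s : String),
    (arr.foldl pvStep (s, 0)).1 = s ++ pvChunks arr := by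
  induction arr using pvChunks.induct with
  | case1 a b c d rest ih =>
      intro s
      have e : pvStep (pvStep (pvStep (pvStep (s, 0) a) b) c) d
          = (s ++ (pvPiece a ++ pvPiece b ++ pvPiece c ++ pvPiece d ++ "\n"), (0 : Int)) := by
        simp [pvStep, pvPiece, pvCell, String.append_assoc]
      simp only [List.foldl_cons, e, ih, pvChunks]
      simp [String.append_assoc]
  | case2 l h =>
      intro s
      rcases l with _ | ⟨a, _ | ⟨b, _ | ⟨c, _ | ⟨d, rest⟩⟩⟩⟩
      · simp [pvChunks, String.join, List.foldl]
      · simp [List.foldl, pvStep, pvChunks, pvPiece, pvCell, String.join, String.append_assoc]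
      · simp [List.foldl, pvStep, pvChunks, pvPiece, pvCell, String.join, String.append_assoc]
      · simp [List.foldl, pvStep, pvChunks, pvPiece, pvCell, String.join, String.append_assoc]
      · exact (h a b c d rest rfl).elim

-- ===== VERDICT (by name: the statement is the Claim_ definition above) =====
theorem returnColumnCord_spec : Claim_equal_returnColumnCord := by
  intro arr _ _
  unfold Spec_returnColumnCord returnColumnCord returnColumnCord_alt
  exact pvFoldl_chunks arr "\n"
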